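-- pv_equiv track=rewrite | github.com/matgille/wtpsplit | wtpsplit/train/train_lora.py | _gold_boundaries_from_sentences
-- ===== SOURCE A (Python) =====
-- from typing import List, Optional
--
-- def _gold_boundaries_from_sentences(sents: List[str]) -> List[int]:
--     """Positions char des frontières or (juste après chaque phrase), avec '\n' entre phrases."""
--     pos, out = 0, []
--     for i, s in enumerate(sents):
--         pos += len(s)
--         if i < len(sents) - 1:   # pas de frontière après la dernière
--             out.append(pos)      # frontière = fin de phrase
--             pos += 1             # compte le '\n' inséré entre les phrases
--     return out
-- ===== SOURCE B (Python) =====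
-- from typing import List
--
-- def _gold_boundaries_from_sentences(sents: List[str]) -> List[int]:
--     # Prefix-sum table of sentence lengths, then an index-driven pass:
--     # boundary i = prefix[i+1] + i  (the '+ i' accounts for the i newlines inserted before it).
--     prefix = [0]
--     for s in sents:
--         prefix.append(prefix[-1] + len(s))
--     return [prefix[i + 1] + i for i in range(len(sents) - 1)]
-- ===== Notes on version B (the rewrite author's own statement) =====
-- stated objective: alternative
-- what changed: Replaces A's single fused loop with an interleaved running-position counter by a precomputed prefix-sum table of sentence lengths plus a separate index-driven pass that adds the newline offset '+i' arithmetically.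
import Mathlib
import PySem

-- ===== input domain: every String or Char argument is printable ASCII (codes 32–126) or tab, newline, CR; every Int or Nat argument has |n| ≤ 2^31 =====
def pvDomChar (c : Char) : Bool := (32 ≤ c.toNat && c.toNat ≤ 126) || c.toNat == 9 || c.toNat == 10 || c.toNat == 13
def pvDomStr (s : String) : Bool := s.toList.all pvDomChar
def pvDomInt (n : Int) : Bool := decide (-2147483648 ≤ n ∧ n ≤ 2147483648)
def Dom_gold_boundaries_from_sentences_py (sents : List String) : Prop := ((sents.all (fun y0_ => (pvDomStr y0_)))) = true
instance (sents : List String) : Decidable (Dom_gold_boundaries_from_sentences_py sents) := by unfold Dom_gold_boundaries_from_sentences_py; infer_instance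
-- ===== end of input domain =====

-- B replaces A's fused running counter by a prefix-sum table plus an index pass with an explicit '+i' newline offset (alternative decomposition, same return values).

-- ===== PORT A =====
-- literal port of A: one loop over enumerate(sents) carrying (pos, out)
def gold_boundaries_from_sentences_py (sents : List String) : List Int :=
  let n : Int := sents.length
  ((PySem.List.enumerate sents 0).foldl
    (fun (st : Int × List Int) (p : Int × String) =>
      let pos := st.1 + PySem.Str.len p.2
      if p.1 < n - 1 then (pos + 1, st.2 ++ [pos]) else (pos, st.2))
    (0, [])).2

-- ===== PORT B =====
-- literal port of B: build the prefix-sum table, then an index-driven pass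
def gold_boundaries_from_sentences_py_alt (sents : List String) : List Int :=
  let pre_ := sents.foldl
    (fun (pre : List Int) (s : String) =>
      pre ++ [PySem.List.pyGetD pre (-1) 0 + PySem.Str.len s]) [0]
  (PySem.List.pyRange 0 ((sents.length : Int) - 1) 1).map
    (fun i => PySem.List.pyGetD pre_ (i + 1) 0 + i)

-- ===== PRECONDITION & SPEC =====
def Spec_gold_boundaries_from_sentences_py (sents : List String) (out : List Int) : Prop := out = gold_boundaries_from_sentences_py_alt sents
instance (sents : List String) (out : List Int) : Decidable (Spec_gold_boundaries_from_sentences_py sents out) := by unfold Spec_gold_boundaries_from_sentences_py; infer_instance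

-- ===== CLAIM (what is proved, stated in full; the proofs are below) =====
def Claim_equal_gold_boundaries_from_sentences_py : Prop := ∀ (sents : List String), Dom_gold_boundaries_from_sentences_py sents → Spec_gold_boundaries_from_sentences_py sents (gold_boundaries_from_sentences_py sents)

-- ===== LEMMAS AND PROOFS =====

-- common model: the list of boundaries starting from running position `pos`
def pvModel : List String → Int → List Int
  | [], _ => []
  | [_], _ => []
  | s :: t :: r, pos =>
      (pos + PySem.Str.len s) :: pvModel (t :: r) (pos + PySem.Str.len s + 1)

-- running prefix sums of the lengths, starting from `a` (tail of B's table)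
def pvScan : List String → Int → List Int
  | [], _ => []
  | s :: r, a => (a + PySem.Str.len s) :: pvScan r (a + PySem.Str.len s)

lemma pvScan_shift (xs : List String) (a c : Int) :
    pvScan xs (a + c) = (pvScan xs a).map (· + c) := by
  induction xs generalizing a with
  | nil => rfl
  | cons s r ih =>
      simp only [pvScan, List.map_cons]
      congr 1
      · ring
      · rw [show a + c + PySem.Str.len s = a + PySem.Str.len s + c by ring,
            ih (a + PySem.Str.len s)]

lemma pvScan_length (xs : List String) (a : Int) : (pvScan xs a).length = xs.length := by
  induction xs generalizing a with
  | nil => rfl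
  | cons s r ih => simp [pvScan, ih]

-- A's loop body equals the model
lemma pvA_loop (n : Int) (ys : List String) :
    ∀ (k pos : Int) (acc : List Int), k + ys.length = n →
    ((PySem.List.enumerate ys k).foldl
      (fun (st : Int × List Int) (p : Int × String) =>
        let pos := st.1 + PySem.Str.len p.2
        if p.1 < n - 1 then (pos + 1, st.2 ++ [pos]) else (pos, st.2))
      (pos, acc)).2 = acc ++ pvModel ys pos := by
  induction ys with
  | nil => intro k pos acc _; simp [PySem.List.enumerate_nil, pvModel]
  | cons s rest ih =>
      intro k pos acc hk
      rw [PySem.List.enumerate_cons]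
      cases rest with
      | nil =>
          have hnk : ¬ k < n - 1 := by simp at hk; omega
          simp [List.foldl_cons, hnk, PySem.List.enumerate_nil, pvModel]
      | cons t r =>
          have hkn : k < n - 1 := by simp at hk; omega
          simp only [List.foldl_cons, hkn, if_pos]
          rw [ih (k + 1) (pos + PySem.Str.len s + 1) (acc ++ [pos + PySem.Str.len s])
              (by simp at hk ⊢; omega)]
          simp [pvModel]

lemma pvA_eq_model (sents : List String) :
    gold_boundaries_from_sentences_py sents = pvModel sents 0 := by
  unfold gold_boundaries_from_sentences_py
  rw [pvA_loop (sents.length : Int) sents 0 0 [] (by simp)]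
  simp

-- B's table is 0 :: prefix sums
lemma pvGetD_last (ys : List Int) (y : Int) (d : Int) :
    PySem.List.pyGetD (ys ++ [y]) (-1) d = y := by
  simp [PySem.List.pyGetD, PySem.List.pyGet?, PySem.List.pyIdx?]

lemma pvPrefix_loop (xs : List String) :
    ∀ (ys : List Int) (y : Int),
    xs.foldl (fun (pre : List Int) (s : String) =>
        pre ++ [PySem.List.pyGetD pre (-1) 0 + PySem.Str.len s]) (ys ++ [y])
      = ys ++ [y] ++ pvScan xs y := by
  induction xs with
  | nil => intro ys y; simp [pvScan]
  | cons s r ih =>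
      intro ys y
      rw [List.foldl_cons, pvGetD_last, ih (ys ++ [y]) (y + PySem.Str.len s)]
      simp [pvScan]

-- the model as an index-driven map over the scan
lemma pvModel_eq_map (xs : List String) (pos : Int) :
    pvModel xs pos
      = (List.range (xs.length - 1)).map
          (fun k => (pvScan xs pos).getD k 0 + (k : Int)) := by
  induction xs generalizing pos with
  | nil => rfl
  | cons s rest ih =>
      cases rest with
      | nil => rfl
      | cons t r =>
          simp only [pvModel, List.length_cons]
          rw [show r.length + 1 + 1 - 1 = r.length + 1 from rfl,
              List.range_succ_eq_map, List.map_cons, List.map_map]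
          congr 1
          · simp [pvScan]
          · rw [ih (pos + PySem.Str.len s + 1)]
            rw [show (t :: r).length - 1 = r.length by simp]
            apply List.map_congr_left
            intro k hk
            simp only [List.mem_range] at hk
            have hsh : pvScan (t :: r) (pos + PySem.Str.len s + 1)
                = (pvScan (t :: r) (pos + PySem.Str.len s)).map (· + 1) :=
              pvScan_shift _ _ 1
            have hlen : k < (pvScan (t :: r) (pos + PySem.Str.len s)).length := by
              rw [pvScan_length]; simp; omega
            simp only [Function.comp_apply]
            rw [show pvScan (s :: t :: r) pos
                  = (pos + PySem.Str.len s) :: pvScan (t :: r) (pos + PySem.Str.len s) from rfl,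
                List.getD_cons_succ, hsh,
                List.getD_eq_getElem _ _ (by simpa using hlen),
                List.getD_eq_getElem _ _ hlen, List.getElem_map]
            push_cast
            ring

-- ===== VERDICT (by name: the statement is the Claim_ definition above) =====
theorem gold_boundaries_from_sentences_py_spec : Claim_equal_gold_boundaries_from_sentences_py := by
  intro sents _
  unfold Spec_gold_boundaries_from_sentences_py
  unfold gold_boundaries_from_sentences_py_alt
  rw [show ([(0 : Int)] : List Int) = [] ++ [(0:Int)] from rfl, pvPrefix_loop]
  rw [pvA_eq_model, pvModel_eq_map, PySem.List.pyRange_one]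
  rw [show ((sents.length : Int) - 1 - 0).toNat = sents.length - 1 by omega]
  dsimp only
  rw [List.map_map, List.nil_append]
  apply List.map_congr_left
  intro k hk
  simp only [List.mem_range] at hk
  simp only [Function.comp_apply, zero_add]
  rw [show (k : Int) + 1 = ((k + 1 : Nat) : Int) by push_cast; ring,
      PySem.List.pyGetD_natCast]
  simp
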